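-- pv_equiv track=rewrite | github.com/TeamJungKo/jungko-scrapper | functions/keyword-extractor/_word.py | _select_keywords
-- ===== SOURCE A (Python) =====
-- def _select_keywords(lset, rset):
--     keywords = {}
--     for word, r in sorted(lset.items(), key=lambda x:x[1], reverse=True):
--         len_word = len(word)
--         if len_word == 1:
--             continue
--
--         is_compound = False
--         for e in range(2, len_word):
--             if (word[:e] in keywords) and (word[:e] in rset):
--                 is_compound = True
--                 break
--
--         if not is_compound:
--             keywords[word] = r
--
--     return keywords
-- ===== SOURCE B (Python) =====
-- def _select_keywords(lset, rset):
--     rs = set(rset)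
--     root = {}  # trie over the selected keywords that are also in rset; '' key marks a stored word's end
--     keywords = {}
--     for word, r in sorted(lset.items(), key=lambda x: x[1], reverse=True):
--         if len(word) == 1:
--             continue
--
--         # walk the proper prefixes of word (lengths 1 .. len-1) through the trie
--         node = root
--         is_compound = False
--         for ch in word[:len(word) - 1]:
--             node = node.get(ch)
--             if node is None:
--                 break
--             if '' in node:
--                 is_compound = True
--                 break
--
--         if not is_compound:
--             keywords[word] = r
--             if word in rs:
--                 node = root
--                 for ch in word:
--                     node = node.setdefault(ch, {})
--                 node[''] = True
--     return keywords
-- ===== Notes on version B (the rewrite author's own statement) =====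
-- stated objective: alternative
-- what changed: B replaces A's per-word scan over all proper prefixes (each prefix re-sliced, hashed into the keywords dict and linearly searched in the rset list) by a character trie holding the already-selected keywords that lie in rset (with rset preconverted to a set), so each word is decided by a single walk of its characters through the trie.
import Mathlib
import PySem

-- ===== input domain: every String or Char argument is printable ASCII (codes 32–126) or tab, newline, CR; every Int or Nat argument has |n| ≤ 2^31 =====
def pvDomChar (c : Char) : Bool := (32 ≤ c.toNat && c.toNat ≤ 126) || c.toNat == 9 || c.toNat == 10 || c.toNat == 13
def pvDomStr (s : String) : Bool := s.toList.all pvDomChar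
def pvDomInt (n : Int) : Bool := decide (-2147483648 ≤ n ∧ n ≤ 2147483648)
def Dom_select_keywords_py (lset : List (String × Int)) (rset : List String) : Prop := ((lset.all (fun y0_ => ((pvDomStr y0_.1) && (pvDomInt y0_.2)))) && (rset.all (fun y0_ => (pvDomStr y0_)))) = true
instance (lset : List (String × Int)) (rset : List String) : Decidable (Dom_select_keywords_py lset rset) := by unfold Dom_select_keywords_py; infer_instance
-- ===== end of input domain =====

-- B replaces A's scan of every proper prefix (each looked up by a linear search of the rset list)
-- with a character trie of the already-selected keywords lying in rset, walked once per word (objective: alternative).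

-- ===== PORT A =====
-- loop body of A's 'for word, r in sorted(...)' loop
def stepA (rset : List String) (keywords : PySem.Dict String Int) (wr : String × Int) : PySem.Dict String Int :=
  let word := wr.1
  let len_word := PySem.Str.len word
  if len_word == 1 then keywords
  else
    let is_compound := (PySem.List.pyRange 2 len_word 1).any
      (fun e => keywords.contains (PySem.Str.slice word none (some e)) &&
                rset.contains (PySem.Str.slice word none (some e)))
    if is_compound then keywords else keywords.insert word wr.2

def select_keywords_py (lset : List (String × Int)) (rset : List String) : List (String × Int) :=
  ((PySem.List.sorted (PySem.Dict.ofList lset).items (fun x => x.2) true).foldl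
      (stepA rset) PySem.Dict.empty).items

-- ===== PORT B =====
-- trie node: terminal flag + children (mutual pair instead of a nested inductive)
mutual
inductive PTrie where
  | node : Bool → PChildren → PTrie
inductive PChildren where
  | nil : PChildren
  | cons : Char → PTrie → PChildren → PChildren
end

-- node.get(ch)
def childGet : PChildren → Char → Option PTrie
  | .nil, _ => none
  | .cons c t rest, x => if c = x then some t else childGet rest x

-- the 'for ch in word: node = node.setdefault(ch, {})' insertion walk, then the terminal mark
mutual
def trieInsert : PTrie → List Char → PTrie
  | .node _ ch, [] => .node true ch
  | .node b ch, c :: cs => .node b (childInsert ch c cs)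
  termination_by _t cs => (cs.length, 0)
def childInsert : PChildren → Char → List Char → PChildren
  | .nil, c, cs => .cons c (trieInsert (.node false .nil) cs) .nil
  | .cons c' t rest, c, cs =>
      if c' = c then .cons c' (trieInsert t cs) rest
      else .cons c' t (childInsert rest c cs)
  termination_by ch _ cs => (cs.length, 1 + sizeOf ch)
end

-- the prefix walk of Source B: break on a missing child, succeed on a terminal node
def trieWalk : PTrie → List Char → Bool
  | _, [] => false
  | .node _ ch, c :: cs =>
    match childGet ch c with
    | none => false
    | some (.node term ch') => term || trieWalk (.node term ch') cs
  termination_by _ cs => cs.length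

-- loop body of B's main loop; rs = set(rset) is precomputed in select_keywords_py_alt
def stepB (rs : PySem.Set String) (st : PySem.Dict String Int × PTrie) (wr : String × Int) :
    PySem.Dict String Int × PTrie :=
  let word := wr.1
  let n := word.toList.length
  if n == 1 then st
  else if trieWalk st.2 (word.toList.take (n - 1)) then st
  else
    (st.1.insert word wr.2,
     if rs.contains word then trieInsert st.2 word.toList else st.2)

def select_keywords_py_alt (lset : List (String × Int)) (rset : List String) : List (String × Int) :=
  let rs := PySem.Set.ofList rset
  ((PySem.List.sorted (PySem.Dict.ofList lset).items (fun x => x.2) true).foldl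
      (stepB rs) (PySem.Dict.empty, PTrie.node false PChildren.nil)).1.items

-- ===== PRECONDITION & SPEC =====
def Spec_select_keywords_py (lset : List (String × Int)) (rset : List String) (out : List (String × Int)) : Prop := out = select_keywords_py_alt lset rset
instance (lset : List (String × Int)) (rset : List String) (out : List (String × Int)) : Decidable (Spec_select_keywords_py lset rset out) := by unfold Spec_select_keywords_py; infer_instance

-- ===== CLAIM (what is proved, stated in full; the proofs are below) =====
def Claim_equal_select_keywords_py : Prop := ∀ (lset : List (String × Int)) (rset : List String), Dom_select_keywords_py lset rset → Spec_select_keywords_py lset rset (select_keywords_py lset rset)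

-- ===== LEMMAS AND PROOFS =====

-- the semantic membership of a trie: the flag at the end of the path
def trieMem : PTrie → List Char → Bool
  | .node b _, [] => b
  | .node _ ch, c :: cs =>
    match childGet ch c with
    | none => false
    | some t => trieMem t cs
  termination_by _ cs => cs.length

theorem childGet_childInsert (ch : PChildren) (c : Char) (cs : List Char) (x : Char) :
    childGet (childInsert ch c cs) x =
      if x = c then some (trieInsert ((childGet ch c).getD (PTrie.node false PChildren.nil)) cs)
      else childGet ch x := by
  match ch with
  | .nil =>
    simp only [childInsert, childGet]
    split_ifs with h1 h2 <;> simp_all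
  | .cons c' t rest =>
    have ih := childGet_childInsert rest c cs x
    simp only [childInsert, childGet]
    split_ifs with h1 <;> simp only [childGet, ih] <;> split_ifs <;> simp_all
termination_by sizeOf ch
theorem trieMem_emptyNode : ∀ xs, trieMem (PTrie.node false PChildren.nil) xs = false := by
  intro xs; cases xs <;> simp [trieMem, childGet]

theorem trieMem_trieInsert (cs : List Char) (t : PTrie) (xs : List Char) :
    trieMem (trieInsert t cs) xs = (decide (xs = cs) || trieMem t xs) := by
  match t with
  | .node b ch =>
    match cs, xs with
    | [], [] => simp [trieInsert, trieMem]
    | [], x :: xr => simp [trieInsert, trieMem]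
    | c :: cr, [] => simp [trieInsert, trieMem]
    | c :: cr, x :: xr =>
      simp only [trieInsert, trieMem, childGet_childInsert]
      by_cases hx : x = c
      · subst hx
        rw [if_pos rfl]
        cases hcg : childGet ch x with
        | none => simp [trieMem_trieInsert cr _ xr, trieMem_emptyNode]
        | some t' => simp [trieMem_trieInsert cr _ xr]
      · have hne : ¬ (x :: xr = c :: cr) := by simp [hx]
        rw [if_neg hx]
        simp [hne]

theorem trieWalk_spec (t : PTrie) (xs : List Char) :
    trieWalk t xs = true ↔ ∃ e : Nat, 1 ≤ e ∧ e ≤ xs.length ∧ trieMem t (xs.take e) = true := by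
  induction xs generalizing t with
  | nil => simp [trieWalk]
  | cons c cs ih =>
    match t with
    | .node b ch =>
      cases hcg : childGet ch c with
      | none =>
        simp only [trieWalk, hcg]
        constructor
        · intro h; cases h
        · rintro ⟨e, he1, he2, he3⟩
          obtain ⟨e', rfl⟩ : ∃ e', e = e' + 1 := ⟨e - 1, by omega⟩
          simp [trieMem, hcg] at he3
      | some t' =>
        match t' with
        | .node term ch' =>
          simp only [trieWalk, hcg, Bool.or_eq_true]
          rw [ih]
          constructor
          · rintro (hterm | ⟨e, he1, he2, he3⟩)
            · exact ⟨1, le_refl 1, by simp, by simp [trieMem, hcg, hterm]⟩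
            · exact ⟨e + 1, by omega, by simp; omega, by simpa [trieMem, hcg] using he3⟩
          · rintro ⟨e, he1, he2, he3⟩
            obtain ⟨e', rfl⟩ : ∃ e', e = e' + 1 := ⟨e - 1, by omega⟩
            simp only [List.take_succ_cons, trieMem, hcg] at he3
            rcases Nat.eq_zero_or_pos e' with h0 | hpos
            · subst h0; left; simpa [trieMem] using he3
            · right; exact ⟨e', by omega, by simpa using he2, he3⟩

-- the loop invariant: the trie holds exactly the selected keywords of length ≥ 2 that lie in rset
def INV (rset : List String) (kw : PySem.Dict String Int) (tr : PTrie) : Prop :=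
  ∀ xs : List Char, xs ≠ [] →
    trieMem tr xs = (decide (2 ≤ xs.length) && kw.contains (String.ofList xs) && rset.contains (String.ofList xs))

theorem strSlice_take (s : String) (e : Nat) :
    PySem.Str.slice s none (some (e : Int)) = String.ofList (s.toList.take e) := by
  apply String.toList_inj.mp
  rw [PySem.Str.toList_slice]
  simp [PySem.List.slice_to_natCast]

theorem step_eq (rset : List String) (kw : PySem.Dict String Int) (tr : PTrie)
    (h : INV rset kw tr) (wr : String × Int) :
    (stepB (PySem.Set.ofList rset) (kw, tr) wr).1 = stepA rset kw wr ∧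
    INV rset (stepA rset kw wr) (stepB (PySem.Set.ofList rset) (kw, tr) wr).2 := by
  obtain ⟨word, r⟩ := wr
  simp only [stepA, stepB, PySem.Str.len_eq]
  by_cases hn1 : word.toList.length = 1
  · simp [hn1]
    exact h
  · have hA : (((word.toList.length : Int)) == (1 : Int)) = false := by
      simp only [beq_eq_false_iff_ne, ne_eq]
      exact_mod_cast hn1
    have hB : ((word.toList.length == 1) : Bool) = false := by
      rw [beq_eq_false_iff_ne]
      exact hn1
    have hwalk : trieWalk tr (word.toList.take (word.toList.length - 1)) =
        (PySem.List.pyRange 2 ((word.toList.length : Int)) 1).any (fun e =>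
          kw.contains (PySem.Str.slice word none (some e)) &&
          rset.contains (PySem.Str.slice word none (some e))) := by
      rw [Bool.eq_iff_iff, trieWalk_spec, List.any_eq_true]
      constructor
      · rintro ⟨e, he1, hele, hmem⟩
        rw [List.length_take] at hele
        have hele' : e ≤ word.toList.length - 1 := by omega
        have hlen2 : 2 ≤ word.toList.length := by omega
        rw [List.take_take, show min e (word.toList.length - 1) = e by omega] at hmem
        have hwne : word.toList ≠ [] := by
          intro hh
          rw [hh] at hlen2
          simp at hlen2
        have hne : word.toList.take e ≠ [] := by
          simp only [ne_eq, List.take_eq_nil_iff, not_or]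
          exact ⟨by omega, hwne⟩
        rw [h _ hne] at hmem
        simp only [Bool.and_eq_true, decide_eq_true_eq, List.length_take] at hmem
        obtain ⟨⟨h2e, hkw⟩, hrs⟩ := hmem
        have h2e' : 2 ≤ e := by omega
        have helt : e < word.toList.length := by omega
        refine ⟨(e : Int), ?_, ?_⟩
        · rw [PySem.List.mem_pyRange_one]
          exact ⟨by exact_mod_cast h2e', by exact_mod_cast helt⟩
        · rw [strSlice_take]
          simp only [Bool.and_eq_true]
          exact ⟨hkw, by simpa using hrs⟩
      · rintro ⟨i, hi, hp⟩
        rw [PySem.List.mem_pyRange_one] at hi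
        obtain ⟨hi2, hin⟩ := hi
        obtain ⟨e, rfl⟩ : ∃ e : Nat, i = (e : Int) := ⟨i.toNat, by omega⟩
        have h2e : 2 ≤ e := by exact_mod_cast hi2
        have helt : e < word.toList.length := by exact_mod_cast hin
        rw [strSlice_take] at hp
        simp only [Bool.and_eq_true] at hp
        obtain ⟨hkw, hrs⟩ := hp
        have hwne : word.toList ≠ [] := by
          intro hh
          rw [hh] at helt
          simp at helt
        have hne : word.toList.take e ≠ [] := by
          simp only [ne_eq, List.take_eq_nil_iff, not_or]
          exact ⟨by omega, hwne⟩
        refine ⟨e, by omega, ?_, ?_⟩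
        · rw [List.length_take]; omega
        · rw [List.take_take, show min e (word.toList.length - 1) = e by omega]
          rw [h _ hne]
          simp only [Bool.and_eq_true, decide_eq_true_eq, List.length_take]
          refine ⟨⟨by omega, hkw⟩, ?_⟩
          simpa using hrs
    have hrsb : (PySem.Set.ofList rset).contains word = rset.contains word := by
      rw [Bool.eq_iff_iff]
      simp [PySem.Set.mem_ofList]
    rw [hA, hB, hwalk]
    by_cases hc : (PySem.List.pyRange 2 ((word.toList.length : Int)) 1).any (fun e =>
          kw.contains (PySem.Str.slice word none (some e)) &&
          rset.contains (PySem.Str.slice word none (some e))) = true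
    · rw [hc]
      exact ⟨rfl, h⟩
    · simp only [Bool.not_eq_true] at hc
      simp only [hc, Bool.false_eq_true, if_false, hrsb]
      refine ⟨by trivial, ?_⟩
      intro xs hne
      cases hr : rset.contains word with
      | true =>
        simp only [if_true]
        rw [trieMem_trieInsert]
        by_cases hxs : xs = word.toList
        · subst hxs
          have hofl : String.ofList word.toList = word := by simp
          have hlen1 : 1 ≤ word.toList.length := by
            cases hx : word.toList with
            | nil => exact absurd hx hne
            | cons a l => simp
          rw [hofl]
          have hmem : word ∈ rset := by simpa using hr
          have hll : word.toList.length = word.length := by simp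
          simp [hmem]
          omega
        · have hofne : String.ofList xs ≠ word := by
            intro hh
            apply hxs
            have : (String.ofList xs).toList = word.toList := by rw [hh]
            simpa using this
          have hbeq : (String.ofList xs == word) = false := beq_eq_false_iff_ne.mpr hofne
          simp only [decide_eq_false hxs, Bool.false_or]
          rw [h _ hne]
          simp [PySem.Dict.contains_insert, hbeq]
      | false =>
        simp only [Bool.false_eq_true, if_false]
        rw [h _ hne]
        by_cases hxs : xs = word.toList
        · subst hxs
          have hofl : String.ofList word.toList = word := by simp
          rw [hofl]
          have hnm : word ∉ rset := by simpa using hr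
          simp [hnm]
        · have hofne : String.ofList xs ≠ word := by
            intro hh
            apply hxs
            have : (String.ofList xs).toList = word.toList := by rw [hh]
            simpa using this
          have hbeq : (String.ofList xs == word) = false := beq_eq_false_iff_ne.mpr hofne
          simp [PySem.Dict.contains_insert, hbeq]

theorem loop_eq (rset : List String) (l : List (String × Int)) (kw : PySem.Dict String Int) (tr : PTrie)
    (h : INV rset kw tr) :
    l.foldl (stepA rset) kw = (l.foldl (stepB (PySem.Set.ofList rset)) (kw, tr)).1 := by
  induction l generalizing kw tr with
  | nil => rfl
  | cons wr l ih =>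
    obtain ⟨h1, h2⟩ := step_eq rset kw tr h wr
    simp only [List.foldl_cons]
    have hsplit : stepB (PySem.Set.ofList rset) (kw, tr) wr =
        ((stepB (PySem.Set.ofList rset) (kw, tr) wr).1, (stepB (PySem.Set.ofList rset) (kw, tr) wr).2) := rfl
    rw [hsplit, h1] at *
    exact ih _ _ h2

-- ===== VERDICT (by name: the statement is the Claim_ definition above) =====
theorem select_keywords_py_spec : Claim_equal_select_keywords_py := by
  intro lset rset _
  unfold Spec_select_keywords_py select_keywords_py select_keywords_py_alt
  have h0 : INV rset PySem.Dict.empty (PTrie.node false PChildren.nil) := by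
    intro xs _; simp [trieMem_emptyNode, PySem.Dict.contains_empty]
  rw [loop_eq rset _ _ _ h0]
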